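-- pv_equiv track=rewrite | github.com/Yanghuiwon22/ppp-hannah | homework13/weather__hw_2.py | maximum_temp_gap
-- ===== SOURCE A (Python) =====
-- def maximum_temp_gap(dates, tmax, tmin):
--     max_date = None
--     max_gap = None
--     for i in range(len(dates)):
--         gap = tmax[i] - tmin[i]
--         if max_gap is None or max_gap < gap:
--             max_gap = gap
--             max_date = dates[i]
--     return max_date, max_gap
-- ===== SOURCE B (Python) =====
-- def maximum_temp_gap(dates, tmax, tmin):
--     if not dates:
--         return None, None
--
--     def best(lo, hi):
--         # best (date, gap) over indices [lo, hi); earliest index wins ties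
--         if hi - lo == 1:
--             return dates[lo], tmax[lo] - tmin[lo]
--         mid = (lo + hi) // 2
--         left = best(lo, mid)
--         right = best(mid, hi)
--         return right if left[1] < right[1] else left
--
--     return best(0, len(dates))
-- ===== Notes on version B (the rewrite author's own statement) =====
-- stated objective: alternative
-- what changed: Replaces A's linear scan with a running Optional max by a divide-and-conquer recursion that splits the index range in half and combines halves with a left-biased merge, which preserves A's earliest-wins strict '<' tie-break.
-- outside the precondition, e.g. on maximum_temp_gap([], [], []): A returns (None, None), B returns (None, None)
import Mathlib
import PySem

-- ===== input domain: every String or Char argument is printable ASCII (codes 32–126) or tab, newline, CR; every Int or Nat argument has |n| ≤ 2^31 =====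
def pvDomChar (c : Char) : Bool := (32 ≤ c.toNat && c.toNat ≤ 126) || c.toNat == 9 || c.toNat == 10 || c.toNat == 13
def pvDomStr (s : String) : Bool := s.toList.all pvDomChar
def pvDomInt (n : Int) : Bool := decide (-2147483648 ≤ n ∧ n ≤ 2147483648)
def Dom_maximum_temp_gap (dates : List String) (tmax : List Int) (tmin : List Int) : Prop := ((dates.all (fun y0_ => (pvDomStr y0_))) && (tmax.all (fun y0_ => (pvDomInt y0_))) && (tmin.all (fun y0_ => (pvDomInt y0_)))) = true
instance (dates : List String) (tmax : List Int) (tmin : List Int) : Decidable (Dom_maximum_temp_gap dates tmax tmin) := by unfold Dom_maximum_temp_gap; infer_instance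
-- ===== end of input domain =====

-- B replaces A's linear scan with a divide-and-conquer recursion over index ranges
-- combined by a left-biased merge (same O(n) cost, a different decomposition).


-- ===== PORT A =====
-- A's loop: running (max_date, max_gap) Option state over i in range(len(dates)).
-- Inside Pre_ all indices are in range, so getD stands in for the raising index.
def maximum_temp_gap (dates : List String) (tmax : List Int) (tmin : List Int) : String × Int :=
  let st := (List.range dates.length).foldl
    (fun (st : Option String × Option Int) i =>
      let gap := tmax.getD i 0 - tmin.getD i 0
      match st.2 with
      | none => (dates[i]?, some gap)
      | some mg => if mg < gap then (dates[i]?, some gap) else st)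
    (none, none)
  (st.1.getD "", st.2.getD 0)

-- ===== PORT B =====
-- B's recursive helper best(lo, hi): callers always keep lo < hi with fuel ≥ hi - lo,
-- where the guard 'hi ≤ lo + 1' is exactly Python's 'hi - lo == 1'. The fuel argument
-- (and the guard's widening) only makes the recursion structural/total; it never alters
-- the computed value on the calls actually made.
def pvBest (dates : List String) (tmax : List Int) (tmin : List Int) :
    Nat → Nat → Nat → String × Int
  | 0, lo, _ => (dates.getD lo "", tmax.getD lo 0 - tmin.getD lo 0)
  | fuel + 1, lo, hi =>
    if hi ≤ lo + 1 then (dates.getD lo "", tmax.getD lo 0 - tmin.getD lo 0)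
    else
      let mid := (lo + hi) / 2
      let left := pvBest dates tmax tmin fuel lo mid
      let right := pvBest dates tmax tmin fuel mid hi
      if left.2 < right.2 then right else left

-- Python B returns (None, None) on empty dates — not a value of String × Int;
-- that input is outside Pre_, the ("", 0) here is a placeholder.
def maximum_temp_gap_alt (dates : List String) (tmax : List Int) (tmin : List Int) : String × Int :=
  if dates.length = 0 then ("", 0)
  else pvBest dates tmax tmin dates.length 0 dates.length

-- ===== PRECONDITION & SPEC =====
-- Pre_ excludes empty dates, where A returns (None, None) — not a value of the declared
-- String × Int type — and inputs where tmax or tmin is shorter than dates, where A raises IndexError.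
def Pre_maximum_temp_gap (dates : List String) (tmax : List Int) (tmin : List Int) : Prop :=
  dates ≠ [] ∧ dates.length ≤ tmax.length ∧ dates.length ≤ tmin.length
instance (dates : List String) (tmax : List Int) (tmin : List Int) : Decidable (Pre_maximum_temp_gap dates tmax tmin) := by unfold Pre_maximum_temp_gap; infer_instance

def pvWitness_maximum_temp_gap : List String × List Int × List Int :=
  (["d1", "d2"], [5, 9], [1, 2])

def Spec_maximum_temp_gap (dates : List String) (tmax : List Int) (tmin : List Int) (out : String × Int) : Prop := out = maximum_temp_gap_alt dates tmax tmin
instance (dates : List String) (tmax : List Int) (tmin : List Int) (out : String × Int) : Decidable (Spec_maximum_temp_gap dates tmax tmin out) := by unfold Spec_maximum_temp_gap; infer_instance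

-- ===== CLAIM =====
def Claim_equal_maximum_temp_gap : Prop := ∀ (dates : List String) (tmax : List Int) (tmin : List Int), Dom_maximum_temp_gap dates tmax tmin → Pre_maximum_temp_gap dates tmax tmin → Spec_maximum_temp_gap dates tmax tmin (maximum_temp_gap dates tmax tmin)

-- ===== LEMMAS AND PROOFS =====
-- The i-th (date, gap) pair, the left-biased merge, and the fold both programs compute.
def pvP (dates : List String) (tmax : List Int) (tmin : List Int) (i : Nat) : String × Int :=
  (dates.getD i "", tmax.getD i 0 - tmin.getD i 0)

def pvMerge (a b : String × Int) : String × Int := if a.2 < b.2 then b else a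

def pvF (dates : List String) (tmax : List Int) (tmin : List Int) (lo hi : Nat) : String × Int :=
  ((List.range' (lo + 1) (hi - lo - 1)).map (pvP dates tmax tmin)).foldl pvMerge
    (pvP dates tmax tmin lo)

-- Named copy of A's fold (same lambda as the port), for the induction.
def pvA (dates : List String) (tmax : List Int) (tmin : List Int) (k : Nat) : Option String × Option Int :=
  (List.range k).foldl
    (fun (st : Option String × Option Int) i =>
      let gap := tmax.getD i 0 - tmin.getD i 0
      match st.2 with
      | none => (dates[i]?, some gap)
      | some mg => if mg < gap then (dates[i]?, some gap) else st)
    (none, none)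

theorem pvMerge_assoc (a b c : String × Int) :
    pvMerge (pvMerge a b) c = pvMerge a (pvMerge b c) := by
  unfold pvMerge
  split_ifs <;> first | rfl | omega

theorem pvFoldl_merge (l : List (String × Int)) (a b : String × Int) :
    l.foldl pvMerge (pvMerge a b) = pvMerge a (l.foldl pvMerge b) := by
  induction l generalizing b with
  | nil => rfl
  | cons x t ih => simp only [List.foldl_cons, pvMerge_assoc, ih]

theorem pvF_succ (dates : List String) (tmax : List Int) (tmin : List Int)
    (lo k : Nat) (h : lo ≤ k) :
    pvF dates tmax tmin lo (k + 1) =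
      pvMerge (pvF dates tmax tmin lo k) (pvP dates tmax tmin k) := by
  rcases Nat.eq_or_lt_of_le h with rfl | hlt
  · unfold pvF
    simp [pvMerge]
  · unfold pvF
    have h1 : k + 1 - lo - 1 = (k - lo - 1) + 1 := by omega
    have h2 : lo + 1 + (k - lo - 1) = k := by omega
    rw [h1, List.range'_1_concat, h2, List.map_append, List.foldl_append]
    simp

theorem pvF_split (dates : List String) (tmax : List Int) (tmin : List Int)
    (lo mid hi : Nat) (h1 : lo < mid) (h2 : mid < hi) :
    pvF dates tmax tmin lo hi =
      pvMerge (pvF dates tmax tmin lo mid) (pvF dates tmax tmin mid hi) := by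
  unfold pvF
  have hsplit : hi - lo - 1 = (mid - lo - 1) + (hi - mid) := by omega
  have hmid : lo + 1 + 1 * (mid - lo - 1) = mid := by omega
  have hcons : hi - mid = 1 + (hi - mid - 1) := by omega
  have hone : mid + 1 * 1 = mid + 1 := by omega
  rw [hsplit, ← List.range'_append, hmid, List.map_append, List.foldl_append,
      hcons, ← List.range'_append, hone, List.map_append, List.foldl_append]
  have hm1 : List.range' mid 1 = [mid] := by simp
  rw [hm1]
  simp only [List.map_cons, List.map_nil, List.foldl_cons, List.foldl_nil]
  rw [pvFoldl_merge, Nat.add_sub_cancel_left]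

theorem pvBest_eq_pvF (dates : List String) (tmax : List Int) (tmin : List Int) :
    ∀ fuel lo hi, hi - lo ≤ fuel → lo < hi →
      pvBest dates tmax tmin fuel lo hi = pvF dates tmax tmin lo hi := by
  intro fuel
  induction fuel with
  | zero =>
    intro lo hi hf hlt
    have heq : hi = lo + 1 := by omega
    subst heq
    unfold pvBest pvF
    simp [pvP, List.getD_eq_getElem?_getD]
  | succ fuel ih =>
    intro lo hi hf hlt
    rw [pvBest]
    by_cases hsmall : hi ≤ lo + 1
    · have heq : hi = lo + 1 := by omega
      subst heq
      rw [if_pos (Nat.le_refl _)]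
      unfold pvF
      simp [pvP, List.getD_eq_getElem?_getD]
    · rw [if_neg hsmall]
      show (if (pvBest dates tmax tmin fuel lo ((lo + hi) / 2)).2 <
              (pvBest dates tmax tmin fuel ((lo + hi) / 2) hi).2 then
              pvBest dates tmax tmin fuel ((lo + hi) / 2) hi
            else pvBest dates tmax tmin fuel lo ((lo + hi) / 2)) = pvF dates tmax tmin lo hi
      have hmlo : lo < (lo + hi) / 2 := by omega
      have hmhi : (lo + hi) / 2 < hi := by omega
      rw [ih lo ((lo + hi) / 2) (by omega) hmlo,
          ih ((lo + hi) / 2) hi (by omega) hmhi,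
          pvF_split dates tmax tmin lo ((lo + hi) / 2) hi hmlo hmhi]
      rfl

theorem pvA_eq_pvF (dates : List String) (tmax : List Int) (tmin : List Int)
    (_h1 : dates.length ≤ tmax.length) (_h2 : dates.length ≤ tmin.length) :
    ∀ k, k < dates.length →
      pvA dates tmax tmin (k + 1) =
        (some (pvF dates tmax tmin 0 (k + 1)).1, some (pvF dates tmax tmin 0 (k + 1)).2) := by
  intro k
  induction k with
  | zero =>
    intro h0
    have hget : dates[0]? = some (dates.getD 0 "") := by
      rw [List.getD_eq_getElem _ _ h0, List.getElem?_eq_getElem h0]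
    have hr : List.range 1 = [0] := rfl
    rw [pvA, hr]
    unfold pvF
    simp only [Nat.sub_self, List.range'_zero, List.map_nil, List.foldl_nil, List.foldl_cons,
      List.foldl_nil, pvP, hget]
  | succ k ih =>
    intro hk
    have hk' : k < dates.length := Nat.lt_of_succ_lt hk
    have hget : dates[k + 1]? = some (dates.getD (k + 1) "") := by
      rw [List.getD_eq_getElem _ _ hk, List.getElem?_eq_getElem hk]
    have hstep : pvA dates tmax tmin (k + 1 + 1) =
        (if (pvF dates tmax tmin 0 (k + 1)).2 < tmax.getD (k + 1) 0 - tmin.getD (k + 1) 0 then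
          (dates[k + 1]?, some (tmax.getD (k + 1) 0 - tmin.getD (k + 1) 0))
         else pvA dates tmax tmin (k + 1)) := by
      rw [pvA, List.range_succ, List.foldl_append, ← pvA, ih hk']
      simp
    rw [hstep, pvF_succ dates tmax tmin 0 (k + 1) (Nat.zero_le _), pvMerge, ih hk']
    simp only [pvP]
    split_ifs with hcmp
    · rw [hget]
    · rfl

-- ===== VERDICT =====
theorem maximum_temp_gap_spec : Claim_equal_maximum_temp_gap := by
  intro dates tmax tmin _ hpre
  obtain ⟨hne, h1, h2⟩ := hpre
  unfold Spec_maximum_temp_gap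
  have hn : 0 < dates.length := List.length_pos_iff.mpr hne
  obtain ⟨k, hk⟩ : ∃ k, dates.length = k + 1 := ⟨dates.length - 1, by omega⟩
  have hklt : k < dates.length := by omega
  have hA : maximum_temp_gap dates tmax tmin =
      ((pvA dates tmax tmin dates.length).1.getD "", (pvA dates tmax tmin dates.length).2.getD 0) := rfl
  rw [hA, hk, pvA_eq_pvF dates tmax tmin h1 h2 k hklt]
  unfold maximum_temp_gap_alt
  rw [if_neg (by omega), pvBest_eq_pvF dates tmax tmin dates.length 0 dates.length (by omega) hn, hk]
  simp
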